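-- pv_equiv track=rewrite | github.com/microsoft/gpt-review | src/gpt_review/repositories/devops.py | _get_condensed_patch
-- ===== SOURCE A (Python) =====
-- from typing import Dict, Iterable, List, Optional, Tuple
--
-- SURROUNDING_CONTEXT = 5
--
-- def _get_condensed_patch(patch: List[str]) -> List[str]:
--     """
--     Get a condensed version of the patch.
--
--     Args:
--         patch (List[str]): The patch.
--
--     Returns:
--         List[str]: The condensed patch.
--     """
--     buffer = []
--     result = []
--     trailing_context = 0
--
--     for line in patch:
--         if line.startswith("+") or line.startswith("-"):
--             result.extend(buffer[-SURROUNDING_CONTEXT:])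
--             buffer.clear()
--             result.append(line)
--             trailing_context = SURROUNDING_CONTEXT
--         elif trailing_context > 0:
--             result.append(line)
--             trailing_context -= 1
--         else:
--             buffer.append(line)
--
--     return result
-- ===== SOURCE B (Python) =====
-- from typing import List
--
-- SURROUNDING_CONTEXT = 5
--
-- def _get_condensed_patch(patch: List[str]) -> List[str]:
--     """Keep every change line plus SURROUNDING_CONTEXT lines around each change."""
--     changes = [i for i, line in enumerate(patch)
--                if line.startswith("+") or line.startswith("-")]
--     return [line for i, line in enumerate(patch)
--             if any(j - SURROUNDING_CONTEXT <= i <= j + SURROUNDING_CONTEXT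
--                    for j in changes)]
-- ===== Notes on version B (the rewrite author's own statement) =====
-- stated objective: alternative
-- what changed: A's single streaming pass with a context buffer and trailing-context countdown is replaced by two passes: collect the indices of change lines, then keep exactly the lines whose index lies within 5 of some change index.
import Mathlib
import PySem

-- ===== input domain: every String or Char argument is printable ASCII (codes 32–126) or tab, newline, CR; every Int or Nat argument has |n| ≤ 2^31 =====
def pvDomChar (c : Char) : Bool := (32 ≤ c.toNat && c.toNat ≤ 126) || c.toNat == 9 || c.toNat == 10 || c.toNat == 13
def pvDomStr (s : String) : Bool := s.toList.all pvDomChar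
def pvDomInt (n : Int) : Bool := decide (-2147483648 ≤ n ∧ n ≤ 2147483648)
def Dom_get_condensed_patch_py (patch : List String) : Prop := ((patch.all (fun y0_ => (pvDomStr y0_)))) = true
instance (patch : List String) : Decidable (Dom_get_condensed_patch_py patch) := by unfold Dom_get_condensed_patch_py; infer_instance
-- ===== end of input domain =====

-- B replaces A's streaming buffer/trailing-counter with a two-pass index-window filter (objective: alternative, same cost).

-- ===== PORT A =====
-- shared helper: the change-line test `line.startswith("+") or line.startswith("-")` both Pythons perform
def pvChg (line : String) : Bool :=
  PySem.Str.startswith line "+" || PySem.Str.startswith line "-"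

-- the body of A's for-loop, on the state (buffer, result, trailing_context)
def pvStep (st : List String × List String × Int) (line : String) :
    List String × List String × Int :=
  if pvChg line then
    (([] : List String), st.2.1 ++ PySem.List.slice st.1 (some (-5)) none ++ [line], (5 : Int))
  else if st.2.2 > 0 then
    (st.1, st.2.1 ++ [line], st.2.2 - 1)
  else
    (st.1 ++ [line], st.2.1, st.2.2)

def get_condensed_patch_py (patch : List String) : List String :=
  (patch.foldl pvStep (([] : List String), ([] : List String), (0 : Int))).2.1

-- ===== PORT B =====
def get_condensed_patch_py_alt (patch : List String) : List String :=
  let changes : List Int :=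
    (PySem.List.enumerate patch 0).filterMap (fun p => if pvChg p.2 then some p.1 else none)
  ((PySem.List.enumerate patch 0).filter
      (fun p => changes.any (fun j => decide (j - 5 ≤ p.1) && decide (p.1 ≤ j + 5)))).map (·.2)

-- ===== PRECONDITION & SPEC =====
def Spec_get_condensed_patch_py (patch : List String) (out : List String) : Prop := out = get_condensed_patch_py_alt patch
instance (patch : List String) (out : List String) : Decidable (Spec_get_condensed_patch_py patch out) := by unfold Spec_get_condensed_patch_py; infer_instance

-- ===== CLAIM (what is proved, stated in full; the proofs are below) =====
def Claim_equal_get_condensed_patch_py : Prop := ∀ (patch : List String), Dom_get_condensed_patch_py patch → Spec_get_condensed_patch_py patch (get_condensed_patch_py patch)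

-- ===== LEMMAS AND PROOFS =====

-- last (at most) 5 elements: what `buffer[-5:]` emits
def tr5 (xs : List String) : List String := xs.drop (xs.length - 5)

-- A's loop, tail-recursively, with the accumulated `result` factored out
def gA : List String → List String → Int → List String
  | [], _buf, _t => []
  | l :: ls, buf, t =>
    if pvChg l then tr5 buf ++ l :: gA ls [] 5
    else if t > 0 then l :: gA ls buf (t - 1)
    else gA ls (buf ++ [l]) t

-- change test at an index
def chgAt (ls : List String) (j : Nat) : Bool := pvChg (ls.getD j "")

-- B's keep test, on Nat indices, generalized by a trailing budget t
def keepB (ls : List String) (t : Nat) (i : Nat) : Bool :=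
  decide (i < t) ||
    (List.range ls.length).any (fun j => chgAt ls j && decide (i ≤ j + 5) && decide (j ≤ i + 5))

-- B's output, generalized
def WN (ls : List String) (t : Nat) : List String :=
  ((List.range ls.length).filter (keepB ls t)).map (fun i => ls.getD i "")

lemma slice_neg5 (xs : List String) : PySem.List.slice xs (some (-5)) none = tr5 xs := by
  rw [PySem.List.slice_from_neg_ofNat xs 5 (by omega)]; rfl

lemma foldA (ls : List String) : ∀ (buf res : List String) (t : Int),
    (ls.foldl pvStep (buf, res, t)).2.1 = res ++ gA ls buf t := by
  induction ls with
  | nil => intro buf res t; simp [gA]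
  | cons l ls ih =>
    intro buf res t
    rw [List.foldl_cons]
    by_cases hc : pvChg l
    · have h1 : pvStep (buf, res, t) l = ([], res ++ (tr5 buf ++ [l]), 5) := by
        simp [pvStep, hc, slice_neg5]
      rw [h1, ih [] (res ++ (tr5 buf ++ [l])) 5]
      simp [gA, hc]
    · by_cases ht : t > 0
      · have h1 : pvStep (buf, res, t) l = (buf, res ++ [l], t - 1) := by
          simp [pvStep, hc, ht]
        rw [h1, ih buf (res ++ [l]) (t - 1)]
        simp [gA, hc, ht]
      · have h1 : pvStep (buf, res, t) l = (buf ++ [l], res, t) := by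
          simp [pvStep, hc, ht]
        rw [h1, ih (buf ++ [l]) res t]
        simp [gA, hc, ht]

lemma gA_nochange (ls : List String) : ∀ (buf : List String) (t : Int), 0 ≤ t →
    (∀ l ∈ ls, pvChg l = false) → gA ls buf t = ls.take t.toNat := by
  induction ls with
  | nil => simp [gA]
  | cons l ls ih =>
    intro buf t ht h
    have hl : pvChg l = false := h l (by simp)
    by_cases htp : t > 0
    · have hn : t.toNat = (t - 1).toNat + 1 := by omega
      rw [hn]
      simp only [gA, hl, Bool.false_eq_true, if_false, htp, if_true, List.take_succ_cons]
      rw [ih buf (t - 1) (by omega) (fun x hx => h x (List.mem_cons_of_mem _ hx))]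
    · have ht0 : t = 0 := by omega
      subst ht0
      simp only [gA, hl, Bool.false_eq_true, if_false, htp, Int.toNat_zero,
        List.take_zero]
      rw [ih (buf ++ [l]) 0 le_rfl (fun x hx => h x (List.mem_cons_of_mem _ hx))]
      try simp

lemma gA_split (c : String) (rest : List String) (hc : pvChg c = true) :
    ∀ (pre buf : List String) (t : Int), 0 ≤ t → (∀ l ∈ pre, pvChg l = false) →
    gA (pre ++ c :: rest) buf t =
      pre.take t.toNat ++ tr5 (buf ++ pre.drop t.toNat) ++ c :: gA rest [] 5 := by
  intro pre
  induction pre with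
  | nil => intro buf t ht h; simp [gA, hc]
  | cons p pre ih =>
    intro buf t ht h
    have hp : pvChg p = false := h p (by simp)
    by_cases htp : t > 0
    · have hn : t.toNat = (t - 1).toNat + 1 := by omega
      rw [hn]
      simp only [List.cons_append, gA, hp, Bool.false_eq_true, if_false, htp, if_true,
        List.take_succ_cons, List.drop_succ_cons]
      rw [ih buf (t - 1) (by omega) (fun x hx => h x (List.mem_cons_of_mem _ hx))]
      try simp
    · have ht0 : t = 0 := by omega
      subst ht0
      simp only [List.cons_append, gA, hp, Bool.false_eq_true, if_false, htp,
        Int.toNat_zero, List.take_zero, List.drop_zero]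
      rw [ih (buf ++ [p]) 0 le_rfl (fun x hx => h x (List.mem_cons_of_mem _ hx))]
      try simp

-- generic: filter (· < t) on a range
lemma filter_lt_range (t : Nat) : ∀ (n : Nat),
    (List.range n).filter (fun i => decide (i < t)) = List.range (min t n) := by
  intro n
  induction n with
  | zero => simp
  | succ n ih =>
    rw [List.range_succ, List.filter_append, ih]
    by_cases h : n < t
    · have h1 : min t (n + 1) = min t n + 1 := by omega
      have h2 : min t n = n := by omega
      simp [h, h2, List.range_succ]
    · have h1 : min t (n + 1) = min t n := by omega
      simp [h, h1]

-- generic: reading a prefix back by indices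
lemma map_getD_range (xs : List String) : ∀ (m : Nat), m ≤ xs.length →
    (List.range m).map (fun i => xs.getD i "") = xs.take m := by
  intro m hm
  apply List.ext_getElem
  · simp [hm]
  · intro i h1 h2
    simp only [List.getElem_map, List.getElem_range, List.getElem_take]
    have hi : i < xs.length := by simp at h1; omega
    simp [List.getD_eq_getElem?_getD, List.getElem?_eq_getElem hi]

lemma getD_drop (ls : List String) (k i : Nat) :
    (ls.drop k).getD i "" = ls.getD (k + i) "" := by
  simp [List.getD_eq_getElem?_getD, List.getElem?_drop]

lemma chgAt_drop (ls : List String) (k i : Nat) :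
    chgAt (ls.drop k) i = chgAt ls (k + i) := by
  simp [chgAt]

lemma keepB_iff (ls : List String) (t i : Nat) :
    keepB ls t i = true ↔
      i < t ∨ ∃ j, j < ls.length ∧ chgAt ls j = true ∧ i ≤ j + 5 ∧ j ≤ i + 5 := by
  simp only [keepB, Bool.or_eq_true, decide_eq_true_eq, List.any_eq_true, List.mem_range,
    Bool.and_eq_true]
  constructor
  · rintro (h | ⟨j, hj, ⟨hcj, h1⟩, h2⟩)
    · exact Or.inl h
    · exact Or.inr ⟨j, hj, hcj, h1, h2⟩
  · rintro (h | ⟨j, hj, hcj, h1, h2⟩)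
    · exact Or.inl h
    · exact Or.inr ⟨j, hj, ⟨hcj, h1⟩, h2⟩

lemma keepB_shift (ls : List String) (t : Nat) (ht : t ≤ 5) (k : Nat)
    (hk : k < ls.length) (hck : chgAt ls k = true)
    (hno : ∀ m < k, chgAt ls m = false) (i : Nat) :
    keepB ls t (k + 1 + i) = keepB (ls.drop (k + 1)) 5 i := by
  rw [Bool.eq_iff_iff, keepB_iff, keepB_iff]
  simp only [List.length_drop]
  constructor
  · rintro (h | ⟨j, hj, hcj, h1, h2⟩)
    · exact Or.inl (by omega)
    · rcases Nat.lt_or_ge j (k + 1) with hjk | hjk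
      · have hjk' : j = k := by
          rcases Nat.lt_or_ge j k with h' | h'
          · exact absurd hcj (by simp [hno j h'])
          · omega
        subst hjk'
        exact Or.inl (by omega)
      · refine Or.inr ⟨j - (k + 1), by omega, ?_, by omega, by omega⟩
        rw [chgAt_drop]
        have he : k + 1 + (j - (k + 1)) = j := by omega
        rw [he]; exact hcj
  · rintro (h | ⟨j', hj', hcj, h1, h2⟩)
    · exact Or.inr ⟨k, by omega, hck, by omega, by omega⟩
    · rw [chgAt_drop] at hcj
      exact Or.inr ⟨k + 1 + j', by omega, hcj, by omega, by omega⟩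

lemma keepB_low (ls : List String) (t : Nat) (k : Nat)
    (hk : k < ls.length) (hck : chgAt ls k = true)
    (hno : ∀ m < k, chgAt ls m = false) (i : Nat) (hik : i < k) :
    keepB ls t i = (decide (i < t) || decide (k ≤ i + 5)) := by
  rw [Bool.eq_iff_iff, keepB_iff]
  simp only [Bool.or_eq_true, decide_eq_true_eq]
  constructor
  · rintro (h | ⟨j, hj, hcj, h1, h2⟩)
    · exact Or.inl h
    · right
      have : k ≤ j := by
        by_contra h'
        exact absurd hcj (by simp [hno j (by omega)])
      omega
  · rintro (h | h)
    · exact Or.inl h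
    · exact Or.inr ⟨k, hk, hck, by omega, by omega⟩

lemma keepB_at (ls : List String) (t : Nat) (k : Nat)
    (hk : k < ls.length) (hck : chgAt ls k = true) : keepB ls t k = true := by
  rw [keepB_iff]
  exact Or.inr ⟨k, hk, hck, by omega, by omega⟩

lemma tr5_of_short (xs : List String) (h : xs.length ≤ 5) : tr5 xs = xs := by
  unfold tr5; rw [Nat.sub_eq_zero_of_le h, List.drop_zero]

-- the pre-change part of B's output
lemma WN_low (ls : List String) (t : Nat) (k : Nat)
    (hk : k < ls.length) (hck : chgAt ls k = true)
    (hno : ∀ m < k, chgAt ls m = false) :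
    ((List.range k).filter (keepB ls t)).map (fun i => ls.getD i "") =
      (ls.take k).take t ++ tr5 ((ls.take k).drop t) := by
  have h1 : (List.range k).filter (keepB ls t) =
      (List.range k).filter (fun i => decide (i < t) || decide (k ≤ i + 5)) := by
    apply List.filter_congr
    intro i hi
    exact keepB_low ls t k hk hck hno i (by simpa using hi)
  rw [h1]
  by_cases hkt : k ≤ t + 5
  · have h2 : (List.range k).filter (fun i => decide (i < t) || decide (k ≤ i + 5)) =
        List.range k := by
      rw [List.filter_eq_self]
      intro i hi
      simp only [List.mem_range] at hi
      simp only [Bool.or_eq_true, decide_eq_true_eq]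
      omega
    rw [h2, map_getD_range ls k hk.le]
    have hlen : ((ls.take k).drop t).length ≤ 5 := by
      simp only [List.length_drop, List.length_take]
      omega
    rw [tr5_of_short _ hlen, List.take_append_drop]
  · have hsplit2 : List.range k = List.range (k - 5) ++ (List.range 5).map (fun i => (k - 5) + i) := by
      rw [← List.range_add]
      congr 1
      omega
    rw [hsplit2, List.filter_append, List.filter_map]
    have h2 : (List.range (k - 5)).filter (fun i => decide (i < t) || decide (k ≤ i + 5)) =
        List.range t := by
      have hc : (List.range (k - 5)).filter (fun i => decide (i < t) || decide (k ≤ i + 5)) =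
          (List.range (k - 5)).filter (fun i => decide (i < t)) := by
        apply List.filter_congr
        intro i hi
        simp only [List.mem_range] at hi
        have : ¬ (k ≤ i + 5) := by omega
        simp [this]
      rw [hc, filter_lt_range]
      congr 1
      omega
    have h3 : (List.range 5).filter ((fun i => decide (i < t) || decide (k ≤ i + 5)) ∘
        fun i => (k - 5) + i) = List.range 5 := by
      rw [List.filter_eq_self]
      intro i hi
      simp only [List.mem_range] at hi
      simp only [Function.comp_apply, Bool.or_eq_true, decide_eq_true_eq]
      omega
    rw [h2, h3, List.map_append, List.map_map]
    congr 1
    · rw [map_getD_range ls t (by omega)]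
      rw [List.take_take]
      congr 1
      omega
    · have h4 : ((List.range 5).map ((fun i => ls.getD i "") ∘ fun i => (k - 5) + i)) =
          (List.range 5).map (fun i => (ls.drop (k - 5)).getD i "") := by
        apply List.map_congr_left
        intro i _
        simp only [Function.comp_apply, getD_drop]
      rw [h4, map_getD_range (ls.drop (k - 5)) 5 (by simp; omega)]
      have h5 : ((ls.take k).drop t).length - 5 = k - t - 5 := by
        simp only [List.length_drop, List.length_take]
        omega
      unfold tr5
      rw [h5, List.drop_drop]
      have h6 : t + (k - t - 5) = k - 5 := by omega
      rw [h6, List.drop_take]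
      congr 1
      omega

lemma WN_split (ls : List String) (t : Nat) (ht : t ≤ 5) (k : Nat)
    (hk : k < ls.length) (hck : chgAt ls k = true)
    (hno : ∀ m < k, chgAt ls m = false) :
    WN ls t = (ls.take k).take t ++ tr5 ((ls.take k).drop t) ++
      ls.getD k "" :: WN (ls.drop (k + 1)) 5 := by
  have hm : (ls.drop (k + 1)).length = ls.length - (k + 1) := by simp
  have hsplit : List.range ls.length =
      (List.range k ++ [k]) ++ (List.range (ls.length - (k + 1))).map (fun i => (k + 1) + i) := by
    rw [← List.range_succ, ← List.range_add]
    congr 1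
    omega
  conv_lhs => rw [WN, hsplit]
  rw [List.filter_append, List.filter_append, List.map_append, List.map_append]
  have hB : ([k].filter (keepB ls t)).map (fun i => ls.getD i "") = [ls.getD k ""] := by
    simp [List.filter, keepB_at ls t k hk hck]
  have hC : (((List.range (ls.length - (k + 1))).map (fun i => (k + 1) + i)).filter
      (keepB ls t)).map (fun i => ls.getD i "") = WN (ls.drop (k + 1)) 5 := by
    rw [List.filter_map, List.map_map]
    have h1 : (List.range (ls.length - (k + 1))).filter (keepB ls t ∘ fun i => (k + 1) + i) =
        (List.range (ls.length - (k + 1))).filter (keepB (ls.drop (k + 1)) 5) := by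
      apply List.filter_congr
      intro i _
      simpa [Function.comp] using keepB_shift ls t ht k hk hck hno i
    rw [h1]
    have h2 : ((List.range (ls.length - (k + 1))).filter (keepB (ls.drop (k + 1)) 5)).map
        ((fun i => ls.getD i "") ∘ fun i => (k + 1) + i) =
        ((List.range (ls.length - (k + 1))).filter (keepB (ls.drop (k + 1)) 5)).map
        (fun i => (ls.drop (k + 1)).getD i "") := by
      apply List.map_congr_left
      intro i _
      simp only [Function.comp_apply, getD_drop]
    rw [h2, WN, hm]
  rw [hB, hC, WN_low ls t k hk hck hno, List.append_assoc]
  rfl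

lemma WN_nochange (ls : List String) (t : Nat)
    (h : ∀ l ∈ ls, pvChg l = false) : WN ls t = ls.take t := by
  have hch : ∀ j, chgAt ls j = false := by
    intro j
    unfold chgAt
    rcases Nat.lt_or_ge j ls.length with hj | hj
    · have he : ls.getD j "" = ls[j] := by
        simp [List.getD_eq_getElem?_getD, List.getElem?_eq_getElem hj]
      rw [he]; exact h _ (List.getElem_mem hj)
    · have he : ls.getD j "" = "" := by
        simp [List.getD_eq_getElem?_getD, List.getElem?_eq_none (by omega : ls.length ≤ j)]
      rw [he]; rfl
  unfold WN
  have h1 : (List.range ls.length).filter (keepB ls t) =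
      (List.range ls.length).filter (fun i => decide (i < t)) := by
    apply List.filter_congr
    intro i _
    simp [keepB, hch]
  rw [h1, filter_lt_range]
  rcases Nat.le_total t ls.length with h' | h'
  · rw [Nat.min_eq_left h', map_getD_range ls t h']
  · rw [Nat.min_eq_right h', map_getD_range ls ls.length le_rfl]
    simp [List.take_of_length_le h']

-- PySem.List.enumerate as an index map
lemma enum_eq (ls : List String) : ∀ (s : Int),
    PySem.List.enumerate ls s = (List.range ls.length).map (fun (i : Nat) => (s + (i : Int), ls.getD i "")) := by
  induction ls with
  | nil => intro s; simp [PySem.List.enumerate_nil]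
  | cons l ls ih =>
    intro s
    rw [PySem.List.enumerate_cons, ih (s + 1)]
    rw [List.length_cons, List.range_succ_eq_map, List.map_cons, List.map_map]
    congr 1
    · simp
    · apply List.map_congr_left
      intro i _
      simp only [Function.comp_apply, Nat.succ_eq_add_one, List.getD_cons_succ, Prod.mk.injEq]
      exact ⟨by push_cast; ring, by trivial⟩

lemma B_eq_WN (patch : List String) : get_condensed_patch_py_alt patch = WN patch 0 := by
  simp only [get_condensed_patch_py_alt]
  rw [enum_eq patch 0]
  rw [List.filterMap_map, List.filter_map, List.map_map]
  unfold WN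
  congr 1
  apply List.filter_congr
  intro i hi
  rw [Bool.eq_iff_iff, keepB_iff]
  simp only [Function.comp_apply, List.any_eq_true, List.mem_filterMap, List.mem_range,
    Bool.and_eq_true, decide_eq_true_eq, chgAt]
  constructor
  · rintro ⟨jI, ⟨a, ha, hsome⟩, h1, h2⟩
    by_cases hca : pvChg (patch.getD a "") = true
    · rw [if_pos hca, Option.some.injEq] at hsome
      exact Or.inr ⟨a, ha, hca, by omega, by omega⟩
    · rw [if_neg hca] at hsome
      exact absurd hsome (by simp)
  · rintro (h | ⟨j, hj, hc, h1, h2⟩)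
    · omega
    · refine ⟨(0 : Int) + j, ⟨j, hj, ?_⟩, by omega, by omega⟩
      rw [if_pos hc]

lemma main_eq : ∀ (n : Nat) (ls : List String) (t : Int), ls.length = n → 0 ≤ t → t ≤ 5 →
    gA ls [] t = WN ls t.toNat := by
  intro n
  induction n using Nat.strong_induction_on with
  | _ n ih =>
    intro ls t hn h0 h5
    by_cases hany : ∃ l ∈ ls, pvChg l = true
    · have hk : ls.findIdx pvChg < ls.length := by
        obtain ⟨l, hl, hcl⟩ := hany
        exact List.findIdx_lt_length_of_exists ⟨l, hl, hcl⟩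
      set k := ls.findIdx pvChg with hkdef
      have hck : pvChg ls[k] = true := List.findIdx_getElem (w := hk)
      have hno : ∀ m < k, chgAt ls m = false := by
        intro m hm
        have hml : m < ls.length := by omega
        have := List.not_of_lt_findIdx (p := pvChg) (xs := ls) (by omega)
        unfold chgAt
        simp [List.getD_eq_getElem?_getD, List.getElem?_eq_getElem hml]
        simpa using this
      have hckAt : chgAt ls k = true := by
        unfold chgAt
        simp [List.getD_eq_getElem?_getD, List.getElem?_eq_getElem hk, hck]
      have hdec : ls = ls.take k ++ ls[k] :: ls.drop (k + 1) := by
        conv_lhs => rw [← List.take_append_drop k ls]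
        rw [List.drop_eq_getElem_cons hk]
      have hpre : ∀ l ∈ ls.take k, pvChg l = false := by
        intro l hl
        obtain ⟨i, hi, rfl⟩ := List.getElem_of_mem hl
        have hik : i < k := by simp at hi; omega
        have := hno i hik
        unfold chgAt at this
        have hil : i < ls.length := by omega
        simpa [List.getD_eq_getElem?_getD, List.getElem?_eq_getElem hil,
          List.getElem_take] using this
      have hstep : gA ls [] t =
          (ls.take k).take t.toNat ++ tr5 ((ls.take k).drop t.toNat) ++
            ls[k] :: gA (ls.drop (k + 1)) [] 5 := by
        conv_lhs => rw [hdec]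
        rw [gA_split ls[k] (ls.drop (k + 1)) hck (ls.take k) [] t h0 hpre]
        simp
      rw [hstep, WN_split ls t.toNat (by omega) k hk hckAt hno,
        ih (ls.drop (k + 1)).length (by simp; omega) (ls.drop (k + 1)) 5 rfl (by omega) le_rfl]
      have he : ls.getD k "" = ls[k] := by
        simp [List.getD_eq_getElem?_getD, List.getElem?_eq_getElem hk]
      rw [he]
      rfl
    · have h : ∀ l ∈ ls, pvChg l = false := by
        intro l hl
        by_contra hc
        exact hany ⟨l, hl, by simpa using hc⟩
      rw [gA_nochange ls [] t h0 h, WN_nochange ls t.toNat h]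

-- ===== VERDICT (by name: the statement is the Claim_ definition above) =====
theorem get_condensed_patch_py_spec : Claim_equal_get_condensed_patch_py := by
  intro patch _
  unfold Spec_get_condensed_patch_py
  rw [B_eq_WN]
  unfold get_condensed_patch_py
  rw [foldA patch [] [] 0]
  have := main_eq patch.length patch 0 rfl le_rfl (by omega)
  simpa using this
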